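-- pv_equiv track=rewrite | github.com/MartinSavko/experimental_methods | src/experimental_methods/experiment/mirror_scan.py | get_close_triplets
-- ===== SOURCE A (Python) =====
-- def get_close_triplets(max_distance=2, nchannels=12):
--     close_triplets = []
--     for k in range(nchannels):
--         for l in range(nchannels):
--             for m in range(nchannels):
--                 if k != l and l != m and k != m:
--                     if (
--                         max([abs(k - l), abs(l - m), abs(k - m)]) <= max_distance
--                         and k < l
--                         and l < m
--                     ):
--                         if (k, l, m) not in close_triplets:
--                             close_triplets.append((k, l, m))
--     return close_triplets
-- ===== SOURCE B (Python) =====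
-- def get_close_triplets(max_distance=2, nchannels=12):
--     close_triplets = []
--     for k in range(nchannels):
--         hi = min(nchannels - 1, k + max_distance)
--         for l in range(k + 1, hi + 1):
--             for m in range(l + 1, hi + 1):
--                 close_triplets.append((k, l, m))
--     return close_triplets
-- ===== Notes on version B (the rewrite author's own statement) =====
-- stated objective: faster
-- what changed: B replaces A's O(n^3) triple scan over all channel triples (with conditions and a redundant membership check) by direct iteration over l,m in the clamped window [k+1, min(n-1,k+d)], appending unconditionally.
import Mathlib
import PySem

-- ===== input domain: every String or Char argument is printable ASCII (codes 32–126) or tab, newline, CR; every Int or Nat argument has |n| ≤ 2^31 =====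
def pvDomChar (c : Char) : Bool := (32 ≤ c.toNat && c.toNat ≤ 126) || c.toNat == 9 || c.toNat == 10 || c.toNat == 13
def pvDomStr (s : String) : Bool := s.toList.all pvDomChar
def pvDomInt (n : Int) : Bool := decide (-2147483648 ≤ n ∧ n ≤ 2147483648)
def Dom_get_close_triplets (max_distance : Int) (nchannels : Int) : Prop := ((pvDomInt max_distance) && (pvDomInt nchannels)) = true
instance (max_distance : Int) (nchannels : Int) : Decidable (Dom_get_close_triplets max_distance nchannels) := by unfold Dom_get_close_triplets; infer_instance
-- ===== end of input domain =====

-- B replaces A's O(n^3) scan of all index triples (with a redundant membership check)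
-- by direct iteration over the clamped window [k+1, min(n-1, k+max_distance)]: faster (asymptotic).

-- ===== PORT A =====
def get_close_triplets (max_distance : Int) (nchannels : Int) : List (List Int) :=
  (PySem.List.pyRange 0 nchannels 1).foldl (fun acc k =>
    (PySem.List.pyRange 0 nchannels 1).foldl (fun acc l =>
      (PySem.List.pyRange 0 nchannels 1).foldl (fun acc m =>
        if k ≠ l ∧ l ≠ m ∧ k ≠ m then
          if max (max |k - l| |l - m|) |k - m| ≤ max_distance ∧ k < l ∧ l < m then
            if [k, l, m] ∉ acc then acc ++ [[k, l, m]] else acc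
          else acc
        else acc) acc) acc) []

-- ===== PORT B =====
def get_close_triplets_alt (max_distance : Int) (nchannels : Int) : List (List Int) :=
  (PySem.List.pyRange 0 nchannels 1).foldl (fun acc k =>
    let hi := min (nchannels - 1) (k + max_distance)
    (PySem.List.pyRange (k + 1) (hi + 1) 1).foldl (fun acc l =>
      (PySem.List.pyRange (l + 1) (hi + 1) 1).foldl (fun acc m =>
        acc ++ [[k, l, m]]) acc) acc) []

-- ===== PRECONDITION & SPEC =====
def Spec_get_close_triplets (max_distance : Int) (nchannels : Int) (out : List (List Int)) : Prop := out = get_close_triplets_alt max_distance nchannels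
instance (max_distance : Int) (nchannels : Int) (out : List (List Int)) : Decidable (Spec_get_close_triplets max_distance nchannels out) := by unfold Spec_get_close_triplets; infer_instance

-- ===== CLAIM (what is proved, stated in full; the proofs are below) =====
def Claim_equal_get_close_triplets : Prop := ∀ (max_distance : Int) (nchannels : Int), Dom_get_close_triplets max_distance nchannels → Spec_get_close_triplets max_distance nchannels (get_close_triplets max_distance nchannels)

-- ===== LEMMAS AND PROOFS =====

-- a fold over a flatMap is the nested fold
theorem foldl_flatMap_eq {α β γ : Type} (l : List α) (g : α → List β) (f : γ → β → γ) (init : γ) :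
    (l.flatMap g).foldl f init = l.foldl (fun b a => (g a).foldl f b) init := by
  induction l generalizing init <;> simp [*]

-- the 'append unless already present' loop is a plain append when everything appended is fresh
theorem fresh_foldl {α β : Type} [BEq β] [LawfulBEq β] (p q : α → Prop) [DecidablePred p] [DecidablePred q]
    (f : α → β) : ∀ (l : List α) (acc : List β),
    (∀ x ∈ l, p x → q x → f x ∉ acc) →
    ((l.filter (fun x => decide (p x ∧ q x))).map f).Nodup →
    l.foldl (fun a x => if p x then (if q x then (if f x ∉ a then a ++ [f x] else a) else a) else a) acc
      = acc ++ (l.filter (fun x => decide (p x ∧ q x))).map f := by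
  intro l
  induction l with
  | nil => intro acc _ _; simp
  | cons x t ih =>
    intro acc hfresh hnd
    by_cases hp : p x
    · by_cases hq : q x
      · have hx : f x ∉ acc := hfresh x (by simp) hp hq
        have hfilter : (x :: t).filter (fun x => decide (p x ∧ q x)) =
            x :: t.filter (fun x => decide (p x ∧ q x)) := by
          simp [List.filter_cons, hp, hq]
        rw [hfilter] at hnd ⊢
        simp only [List.map_cons, List.nodup_cons] at hnd
        simp only [List.foldl_cons, if_pos hp, if_pos hq, if_pos hx]
        rw [ih (acc ++ [f x]) ?_ hnd.2]
        · simp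
        · intro y hy hpy hqy
          simp only [List.mem_append, List.mem_singleton, not_or]
          refine ⟨hfresh y (by simp [hy]) hpy hqy, ?_⟩
          intro hcon
          exact hnd.1 (hcon ▸ List.mem_map_of_mem (List.mem_filter.mpr ⟨hy, by simp [hpy, hqy]⟩))
      · have hfilter : (x :: t).filter (fun x => decide (p x ∧ q x)) =
            t.filter (fun x => decide (p x ∧ q x)) := by simp [List.filter_cons, hq]
        rw [hfilter] at hnd ⊢
        simp only [List.foldl_cons, if_pos hp, if_neg hq]
        exact ih acc (fun y hy => hfresh y (by simp [hy])) hnd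
    · have hfilter : (x :: t).filter (fun x => decide (p x ∧ q x)) =
          t.filter (fun x => decide (p x ∧ q x)) := by simp [List.filter_cons, hp]
      rw [hfilter] at hnd ⊢
      simp only [List.foldl_cons, if_neg hp]
      exact ih acc (fun y hy => hfresh y (by simp [hy])) hnd

-- filtering a step-1 range by an interval is the intersected range
theorem filter_pyRange (lo hib : Int) : ∀ (len : Nat) (a b : Int), (b - a).toNat = len →
    (PySem.List.pyRange a b 1).filter (fun x => decide (lo ≤ x ∧ x < hib))
      = PySem.List.pyRange (max a lo) (min b hib) 1 := by
  intro len
  induction len with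
  | zero =>
    intro a b hlen
    rw [PySem.List.pyRange_one_eq_nil (by omega), PySem.List.pyRange_one_eq_nil (by omega)]
    simp
  | succ len ih =>
    intro a b hlen
    have hab : a < b := by omega
    rw [PySem.List.pyRange_one_cons hab, List.filter_cons]
    rw [ih (a + 1) b (by omega)]
    by_cases hc : lo ≤ a ∧ a < hib
    · have h1 : max (a + 1) lo = a + 1 := by omega
      have h2 : max a lo = a := by omega
      rw [if_pos (by simpa using hc), h1, h2,
        PySem.List.pyRange_one_cons (by omega : a < min b hib)]
    · rw [if_neg (by simpa using hc)]
      by_cases hlo : a < lo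
      · congr 1 <;> omega
      · have h3 : min b hib ≤ max a lo := by omega
        have h4 : min b hib ≤ max (a + 1) lo := by omega
        rw [PySem.List.pyRange_one_eq_nil (by omega), PySem.List.pyRange_one_eq_nil (by omega)]

-- contributions known to be empty can be dropped from a flatMap
theorem flatMap_filter_of_nil {α β : Type} (q : α → Bool) (F : α → List β) :
    ∀ (l : List α), (∀ x ∈ l, q x = false → F x = []) →
    l.flatMap F = (l.filter q).flatMap F := by
  intro l
  induction l with
  | nil => simp
  | cons x t ih =>
    intro h
    by_cases hq : q x = true
    · simp [hq, ih (fun y hy => h y (by simp [hy]))]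
    · rw [List.flatMap_cons, List.filter_cons, if_neg hq, h x (by simp) (by simpa using hq),
        List.nil_append]
      exact ih (fun y hy => h y (by simp [hy]))

-- the flattened triple list A iterates over, and its predicate
def pvTriples (n : Int) : List (Int × Int × Int) :=
  (PySem.List.pyRange 0 n 1).flatMap (fun k =>
    (PySem.List.pyRange 0 n 1).flatMap (fun l =>
      (PySem.List.pyRange 0 n 1).map (fun m => (k, l, m))))

theorem pvTriples_nodup (n : Int) : (pvTriples n).Nodup := by
  have : pvTriples n = (PySem.List.pyRange 0 n 1) ×ˢ ((PySem.List.pyRange 0 n 1) ×ˢ (PySem.List.pyRange 0 n 1)) := by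
    simp [pvTriples, SProd.sprod, List.product, List.map_flatMap, List.map_map, Function.comp_def]
  rw [this]
  exact (PySem.List.nodup_pyRange_one 0 n).product
    ((PySem.List.nodup_pyRange_one 0 n).product (PySem.List.nodup_pyRange_one 0 n))

theorem pvTripleFun_injective : Function.Injective (fun t : Int × Int × Int => [t.1, t.2.1, t.2.2]) := by
  rintro ⟨a, b, c⟩ ⟨a', b', c'⟩ h
  simp_all

-- the condition tested by A, as a predicate on a triple (for a fixed max_distance d)
theorem pvCond_iff (d k l m : Int) (hkl : k < l) :
    ((k ≠ l ∧ l ≠ m ∧ k ≠ m) ∧ (max (max |k - l| |l - m|) |k - m| ≤ d ∧ k < l ∧ l < m))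
      ↔ (l + 1 ≤ m ∧ m < k + d + 1) := by
  constructor
  · rintro ⟨-, hmax, -, hlm⟩
    have e3 : |k - m| = m - k := by rw [abs_sub_comm]; exact abs_of_pos (by omega)
    rw [e3] at hmax
    have := le_trans (le_max_right _ _) hmax
    omega
  · rintro ⟨h1, h2⟩
    have e1 : |k - l| = l - k := by rw [abs_sub_comm]; exact abs_of_pos (by omega)
    have e2 : |l - m| = m - l := by rw [abs_sub_comm]; exact abs_of_pos (by omega)
    have e3 : |k - m| = m - k := by rw [abs_sub_comm]; exact abs_of_pos (by omega)
    refine ⟨⟨by omega, by omega, by omega⟩, ?_, by omega, by omega⟩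
    rw [e1, e2, e3, max_le_iff, max_le_iff]
    omega

theorem key (d n : Int) : get_close_triplets d n = get_close_triplets_alt d n := by
  -- A as a fold over the flattened triple list
  have hA0 : get_close_triplets d n =
      (pvTriples n).foldl (fun acc t =>
        if t.1 ≠ t.2.1 ∧ t.2.1 ≠ t.2.2 ∧ t.1 ≠ t.2.2 then
          if max (max |t.1 - t.2.1| |t.2.1 - t.2.2|) |t.1 - t.2.2| ≤ d ∧ t.1 < t.2.1 ∧ t.2.1 < t.2.2 then
            if [t.1, t.2.1, t.2.2] ∉ acc then acc ++ [[t.1, t.2.1, t.2.2]] else acc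
          else acc
        else acc) [] := by
    rw [pvTriples, foldl_flatMap_eq]
    simp only [foldl_flatMap_eq, List.foldl_map]
    rfl
  -- the membership test never fires: A is the filtered, mapped triple list
  have hA : get_close_triplets d n =
      ((pvTriples n).filter (fun t =>
        decide ((t.1 ≠ t.2.1 ∧ t.2.1 ≠ t.2.2 ∧ t.1 ≠ t.2.2) ∧
          (max (max |t.1 - t.2.1| |t.2.1 - t.2.2|) |t.1 - t.2.2| ≤ d ∧ t.1 < t.2.1 ∧ t.2.1 < t.2.2)))).map
        (fun t => [t.1, t.2.1, t.2.2]) := by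
    rw [hA0]
    exact (fresh_foldl (fun t : Int × Int × Int => t.1 ≠ t.2.1 ∧ t.2.1 ≠ t.2.2 ∧ t.1 ≠ t.2.2)
      (fun t => max (max |t.1 - t.2.1| |t.2.1 - t.2.2|) |t.1 - t.2.2| ≤ d ∧ t.1 < t.2.1 ∧ t.2.1 < t.2.2)
      (fun t => [t.1, t.2.1, t.2.2]) (pvTriples n) [] (by simp)
      ((((pvTriples_nodup n).filter _).map pvTripleFun_injective))).trans (List.nil_append _)
  rw [hA]
  -- B as a flatMap
  have hB : get_close_triplets_alt d n =
      (PySem.List.pyRange 0 n 1).flatMap (fun k =>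
        (PySem.List.pyRange (k + 1) (min (n - 1) (k + d) + 1) 1).flatMap (fun l =>
          (PySem.List.pyRange (l + 1) (min (n - 1) (k + d) + 1) 1).map (fun m => [k, l, m]))) := by
    rw [get_close_triplets_alt]
    simp only [PySem.List.foldl_append_singleton_eq_map, PySem.List.foldl_append_eq_flatMap]
    induction (PySem.List.pyRange 0 n 1) <;> simp [*]
  rw [hB, pvTriples]
  simp only [List.filter_flatMap, List.filter_map, List.map_flatMap, List.map_map]
  -- per-k congruence
  rw [List.flatMap_def, List.flatMap_def,
    List.map_congr_left (f := _) (g := fun k =>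
      (PySem.List.pyRange (k + 1) (min (n - 1) (k + d) + 1) 1).flatMap (fun l =>
        (PySem.List.pyRange (l + 1) (min (n - 1) (k + d) + 1) 1).map (fun m => [k, l, m]))) ?_]
  intro k hk
  obtain ⟨hk0, hkn⟩ := (PySem.List.mem_pyRange_one).mp hk
  -- drop the l's with empty contribution, then identify the remaining range
  have hinner : ∀ l, k < l → l ≤ min (n - 1) (k + d) →
      ((PySem.List.pyRange 0 n 1).filter
        (((fun t : Int × Int × Int =>
          decide ((t.1 ≠ t.2.1 ∧ t.2.1 ≠ t.2.2 ∧ t.1 ≠ t.2.2) ∧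
            (max (max |t.1 - t.2.1| |t.2.1 - t.2.2|) |t.1 - t.2.2| ≤ d ∧ t.1 < t.2.1 ∧ t.2.1 < t.2.2))) ∘
          fun m => (k, l, m)))) = PySem.List.pyRange (l + 1) (min (n - 1) (k + d) + 1) 1 := by
    intro l hkl hlhi
    rw [List.filter_congr (q := fun m => decide (l + 1 ≤ m ∧ m < k + d + 1))
      (fun m _ => by simp only [Function.comp]; rw [decide_eq_decide]; exact pvCond_iff d k l m hkl)]
    rw [filter_pyRange (l + 1) (k + d + 1) ((n - 0).toNat) 0 n rfl]
    congr 1 <;> omega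
  have hdrop : (PySem.List.pyRange 0 n 1).flatMap (fun l =>
      ((PySem.List.pyRange 0 n 1).filter
        (((fun t : Int × Int × Int =>
          decide ((t.1 ≠ t.2.1 ∧ t.2.1 ≠ t.2.2 ∧ t.1 ≠ t.2.2) ∧
            (max (max |t.1 - t.2.1| |t.2.1 - t.2.2|) |t.1 - t.2.2| ≤ d ∧ t.1 < t.2.1 ∧ t.2.1 < t.2.2))) ∘
          fun m => (k, l, m)))).map ((fun t : Int × Int × Int => [t.1, t.2.1, t.2.2]) ∘ fun m => (k, l, m)))
      = (PySem.List.pyRange (k + 1) (min (n - 1) (k + d) + 1) 1).flatMap (fun l =>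
          (PySem.List.pyRange (l + 1) (min (n - 1) (k + d) + 1) 1).map (fun m => [k, l, m])) := by
    rw [flatMap_filter_of_nil (fun l => decide (k + 1 ≤ l ∧ l < min (n - 1) (k + d) + 1)) _ _ ?_]
    · rw [filter_pyRange (k + 1) (min (n - 1) (k + d) + 1) ((n - 0).toNat) 0 n rfl]
      have h1 : max 0 (k + 1) = k + 1 := by omega
      have h2 : min n (min (n - 1) (k + d) + 1) = min (n - 1) (k + d) + 1 := by omega
      rw [h1, h2, List.flatMap_def, List.flatMap_def,
        List.map_congr_left (f := _) (g := fun l =>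
          (PySem.List.pyRange (l + 1) (min (n - 1) (k + d) + 1) 1).map (fun m => [k, l, m])) ?_]
      intro l hl
      obtain ⟨hl1, hl2⟩ := (PySem.List.mem_pyRange_one).mp hl
      rw [hinner l (by omega) (by omega)]
      simp [Function.comp]
    · intro l hl hfalse
      obtain ⟨hl0, hln⟩ := (PySem.List.mem_pyRange_one).mp hl
      simp only [decide_eq_false_iff_not, not_and, not_lt] at hfalse
      rw [List.map_eq_nil_iff, List.filter_eq_nil_iff]
      intro m hm
      simp only [Function.comp, decide_eq_true_eq]
      rintro ⟨-, hmax, hkl, hlm⟩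
      have e3 : |k - m| = m - k := by rw [abs_sub_comm]; exact abs_of_pos (by omega)
      rw [e3] at hmax
      have := le_trans (le_max_right _ _) hmax
      omega
  exact hdrop

-- ===== VERDICT (by name: the statement is the Claim_ definition above) =====
theorem get_close_triplets_spec : Claim_equal_get_close_triplets := by
  intro d n _
  unfold Spec_get_close_triplets
  exact key d n
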